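-- pv_equiv track=rewrite | github.com/GoshKolotyan/liquid_metals | utils/generation.py | extract_elements_from_name
-- ===== SOURCE A (Python) =====
-- def extract_elements_from_name(system_name):
--     """Extract element names from a system name like 'Ga0.3In0.3Sn0.4' -> ['Ga', 'In', 'Sn']"""
--     elements = []
--     i = 0
--     while i < len(system_name):
--         if system_name[i].isupper():
--             element = system_name[i]
--             i += 1
--             # Check if there's a lowercase letter (for elements like 'Bi', 'Sb')
--             if i < len(system_name) and system_name[i].islower():
--                 element += system_name[i]
--                 i += 1
--             elements.append(element)
--             # Skip the ratio part
--             while i < len(system_name) and not system_name[i].isupper():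
--                 i += 1
--         else:
--             i += 1
--     return elements
-- ===== SOURCE B (Python) =====
-- def extract_elements_from_name(system_name):
--     """Extract element names from a system name like 'Ga0.3In0.3Sn0.4' -> ['Ga', 'In', 'Sn']"""
--     idx = [i for i, c in enumerate(system_name) if c.isupper()]
--     elements = []
--     for i in idx:
--         el = system_name[i]
--         if i + 1 < len(system_name) and system_name[i + 1].islower():
--             el += system_name[i + 1]
--         elements.append(el)
--     return elements
-- ===== Notes on version B (the rewrite author's own statement) =====
-- stated objective: simpler
-- what changed: Replaces A's interleaved while-loop (take element, maybe lowercase, then skip-ratio inner loop over a mutable index) by two separate phases: a comprehension collecting the uppercase indices, then a loop building each element from its index.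
import Mathlib
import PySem

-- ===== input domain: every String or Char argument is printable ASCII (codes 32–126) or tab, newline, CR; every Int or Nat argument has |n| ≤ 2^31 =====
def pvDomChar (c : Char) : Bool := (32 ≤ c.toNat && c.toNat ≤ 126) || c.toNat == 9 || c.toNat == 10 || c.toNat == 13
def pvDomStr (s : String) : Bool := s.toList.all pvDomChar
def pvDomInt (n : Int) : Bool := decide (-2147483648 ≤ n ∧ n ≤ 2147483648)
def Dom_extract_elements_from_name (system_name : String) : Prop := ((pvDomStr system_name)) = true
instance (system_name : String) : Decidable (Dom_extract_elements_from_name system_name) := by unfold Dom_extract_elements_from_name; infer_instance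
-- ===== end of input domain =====

-- B replaces A's interleaved take-element/skip-ratio while-loop by a two-phase pass
-- (collect uppercase indices, then build each element from its index); objective: simpler.

-- ===== PORT A =====
-- inner while loop 'while i < len and not s[i].isupper(): i += 1' as a list suffix
def pvSkipRatio : List Char → List Char
  | [] => []
  | c :: t => if PySem.Chars.isupper c then c :: t else pvSkipRatio t

theorem pvSkipRatio_length_le : ∀ l : List Char, (pvSkipRatio l).length ≤ l.length := by
  intro l
  induction l with
  | nil => simp [pvSkipRatio]
  | cons c t ih =>
      simp only [pvSkipRatio]
      split
      · exact Nat.le_refl _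
      · exact Nat.le_succ_of_le ih

-- the outer while loop of A over the remaining characters
def pvLoopA : List Char → List String
  | [] => []
  | c :: t =>
    if PySem.Chars.isupper c then
      match t with
      | [] => [String.ofList [c]]
      | d :: t' =>
        if PySem.Chars.islower d then
          String.ofList [c, d] :: pvLoopA (pvSkipRatio t')
        else
          String.ofList [c] :: pvLoopA (pvSkipRatio (d :: t'))
    else pvLoopA t
termination_by l => l.length
decreasing_by
  · exact Nat.lt_succ_of_le (Nat.le_succ_of_le (pvSkipRatio_length_le t'))
  · exact Nat.lt_succ_of_le (pvSkipRatio_length_le (d :: t'))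
  · simp

def extract_elements_from_name (system_name : String) : List String :=
  pvLoopA system_name.toList

-- ===== PORT B =====
-- el = s[i] (+ s[i+1] when it exists and is lowercase); indices come from the filter, always in range
def pvElemAt (cs : List Char) (i : Nat) : String :=
  if i + 1 < cs.length && PySem.Chars.islower (cs.getD (i + 1) ' ') then
    String.ofList [cs.getD i ' ', cs.getD (i + 1) ' ']
  else
    String.ofList [cs.getD i ' ']

def extract_elements_from_name_alt (system_name : String) : List String :=
  let cs := system_name.toList
  let idx := ((PySem.List.enumerate cs).filter (fun p => PySem.Chars.isupper p.2)).map (fun p => p.1)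
  idx.map (fun i => pvElemAt cs i.toNat)

-- ===== PRECONDITION & SPEC =====
def Spec_extract_elements_from_name (system_name : String) (out : List String) : Prop := out = extract_elements_from_name_alt system_name
instance (system_name : String) (out : List String) : Decidable (Spec_extract_elements_from_name system_name out) := by unfold Spec_extract_elements_from_name; infer_instance

-- ===== CLAIM (what is proved, stated in full; the proofs are below) =====
def Claim_equal_extract_elements_from_name : Prop := ∀ (system_name : String), Dom_extract_elements_from_name system_name → Spec_extract_elements_from_name system_name (extract_elements_from_name system_name)

-- ===== LEMMAS AND PROOFS =====

-- B's two phases fused: what the alt port computes on a character list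
def pvB (cs : List Char) : List String :=
  ((PySem.List.enumerate cs).filter (fun p => PySem.Chars.isupper p.2)).map
    (fun p => pvElemAt cs p.1.toNat)

theorem alt_eq_pvB (s : String) : extract_elements_from_name_alt s = pvB s.toList := by
  simp [extract_elements_from_name_alt, pvB, List.map_map, Function.comp]

theorem enumerate_shift {α : Type} (t : List α) (s : Int) :
    PySem.List.enumerate t (s + 1) = (PySem.List.enumerate t s).map (fun p => (p.1 + 1, p.2)) := by
  induction t generalizing s with
  | nil => simp [PySem.List.enumerate_nil]
  | cons x xs ih => simp [PySem.List.enumerate_cons, ih]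

theorem pvElemAt_cons_succ (c : Char) (t : List Char) (i : Nat) :
    pvElemAt (c :: t) (i + 1) = pvElemAt t i := by
  simp [pvElemAt]

theorem pvB_cons (c : Char) (t : List Char) :
    pvB (c :: t) = (if PySem.Chars.isupper c then [pvElemAt (c :: t) 0] else []) ++ pvB t := by
  have hmap : List.map (fun p => pvElemAt (c :: t) p.1.toNat)
      (((PySem.List.enumerate t 0).map (fun p => ((p.1 + 1 : Int), p.2))).filter
        (fun p => PySem.Chars.isupper p.2))
      = pvB t := by
    rw [List.filter_map, List.map_map]
    apply List.map_congr_left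
    intro p hp
    have h0 : 0 ≤ p.1 := by
      rcases (PySem.List.mem_enumerate_iff _ _ _).mp (List.mem_of_mem_filter hp) with ⟨k, hk, rfl⟩
      simp
    show pvElemAt (c :: t) (p.1 + 1).toNat = pvElemAt t p.1.toNat
    have ht : (p.1 + 1).toNat = p.1.toNat + 1 := by omega
    rw [ht, pvElemAt_cons_succ]
  unfold pvB
  rw [PySem.List.enumerate_cons, enumerate_shift t 0, List.filter_cons]
  by_cases hc : PySem.Chars.isupper c
  · rw [if_pos (by simpa using hc), List.map_cons, hmap, if_pos hc]
    rfl
  · rw [if_neg (by simpa using hc), hmap, if_neg hc]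
    rfl

theorem islower_not_isupper (c : Char) (h : PySem.Chars.islower c = true) :
    PySem.Chars.isupper c = false := by
  simp [PySem.Chars.islower, PySem.Chars.isupper, Char.le_def, UInt32.le_iff_toNat_le] at h ⊢
  omega

theorem pvLoopA_skipRatio (l : List Char) : pvLoopA (pvSkipRatio l) = pvLoopA l := by
  induction l with
  | nil => simp [pvSkipRatio]
  | cons c t ih =>
      have e : pvSkipRatio (c :: t) =
          if PySem.Chars.isupper c then c :: t else pvSkipRatio t := by
        rw [pvSkipRatio.eq_def]
      by_cases h : PySem.Chars.isupper c
      · rw [e, if_pos h]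
      · rw [e, if_neg h, ih]
        conv_rhs => rw [pvLoopA.eq_def]
        simp [h]

theorem pvLoopA_eq_pvB : ∀ (n : Nat) (cs : List Char), cs.length ≤ n → pvLoopA cs = pvB cs := by
  intro n
  induction n with
  | zero =>
      intro cs h
      have : cs = [] := List.eq_nil_of_length_eq_zero (Nat.le_zero.mp h)
      subst this; simp [pvLoopA, pvB, PySem.List.enumerate_nil]
  | succ n ih =>
      intro cs h
      match cs with
      | [] => simp [pvLoopA, pvB, PySem.List.enumerate_nil]
      | c :: t =>
        rw [pvB_cons]
        by_cases hc : PySem.Chars.isupper c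
        · match t with
          | [] =>
              rw [pvLoopA.eq_def]
              simp [hc, pvB, PySem.List.enumerate_nil, pvElemAt]
          | d :: t' =>
            have hhead : pvElemAt (c :: d :: t') 0 =
                if PySem.Chars.islower d then String.ofList [c, d] else String.ofList [c] := by
              by_cases hd : PySem.Chars.islower d <;>
                simp [pvElemAt, hd, List.getD]
            rw [pvLoopA.eq_def]
            by_cases hd : PySem.Chars.islower d
            · simp only [hc, if_true, hd, hhead]
              have hrec : pvLoopA (pvSkipRatio t') = pvB t' := by
                rw [pvLoopA_skipRatio]
                exact ih t' (by simp at h; omega)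
              rw [hrec, pvB_cons, islower_not_isupper d hd]
              simp
            · simp only [hc, if_true, hd, hhead]
              have hrec : pvLoopA (pvSkipRatio (d :: t')) = pvB (d :: t') := by
                rw [pvLoopA_skipRatio]
                exact ih (d :: t') (by simp at h ⊢; omega)
              rw [hrec]
              simp
        · rw [pvLoopA.eq_def]
          simp only [hc, Bool.false_eq_true, if_false, List.nil_append]
          exact ih t (by simp at h; omega)

-- ===== VERDICT (by name: the statement is the Claim_ definition above) =====
theorem extract_elements_from_name_spec : Claim_equal_extract_elements_from_name := by
  intro s _
  unfold Spec_extract_elements_from_name extract_elements_from_name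
  rw [alt_eq_pvB]
  exact pvLoopA_eq_pvB s.toList.length s.toList (Nat.le_refl _)
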